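-- pv_equiv track=rewrite | github.com/duswo3o/algorithm_codekata | 0627_GCD.py | solution
-- ===== SOURCE A (Python) =====
-- def solution (m, n):
--
--     # m이 n보다 큰 수가 되도록 설정
--     if n > m:
--         m, n = n, m
--     '''다른 사람의 풀이 중 참고하고싶었던 부분
--     조건문을 사용하지 않고
--     m, n = max(m,n), min(m,n)으로 작성 할 수 있었음!'''
--
--     # 유클리드 호제법을 이용하여 최대공약수 구하기
--     def GCD(m, n):
--         a, b = m, n
--         r = m % n # m을 n으로 나눈 나머지
--         if r != 0:
--             # 나머지가 0이 될 때까지 반복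
--             while(r!=0):
--                 a, b = b, r # a, b 업데이트
--                 r = a % b   # 나머지 업데이트
--         return b # 나머지가 0일때의 나누는 수가 최대공약수가 됨
--
--     gcd = GCD(m,n)
--
--     return [gcd, gcd*(m//gcd)*(n//gcd)]
-- ===== SOURCE B (Python) =====
-- def solution(m, n):
--     if n > m:
--         m, n = n, m
--
--     # recursive Euclid: compute the remainder first, so a zero divisor
--     # raises ZeroDivisionError exactly like the iterative original
--     def GCD(a, b):
--         r = a % b
--         if r == 0:
--             return b
--         return GCD(b, r)
--
--     gcd = GCD(m, n)
--     return [gcd, gcd * (m // gcd) * (n // gcd)]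
-- ===== Notes on version B (the rewrite author's own statement) =====
-- stated objective: simpler
-- what changed: The iterative three-variable Euclidean while-loop helper is replaced by a direct recursive GCD (compute r = a % b first, return b when r == 0, else recurse on (b, r)); the outer swap-and-LCM structure is kept.
import Mathlib
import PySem

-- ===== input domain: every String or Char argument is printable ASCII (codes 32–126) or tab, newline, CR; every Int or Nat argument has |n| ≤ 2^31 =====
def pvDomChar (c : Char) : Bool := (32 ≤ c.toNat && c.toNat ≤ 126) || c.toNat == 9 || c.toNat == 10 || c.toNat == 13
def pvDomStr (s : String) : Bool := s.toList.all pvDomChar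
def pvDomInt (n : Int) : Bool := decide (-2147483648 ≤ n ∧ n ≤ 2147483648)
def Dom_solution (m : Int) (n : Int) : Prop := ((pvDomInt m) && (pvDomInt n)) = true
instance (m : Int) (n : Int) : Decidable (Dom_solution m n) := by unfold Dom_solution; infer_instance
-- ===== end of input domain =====

-- B replaces the iterative three-variable Euclidean while-loop by a direct
-- recursive GCD (remainder computed first, recurse on (b, r)); objective: simpler.


-- |a % b| < |b| for b ≠ 0 (Python mod has the divisor's sign): termination of both Euclid loops
theorem pvModNatAbsLt (a b : Int) (hb : b ≠ 0) :
    (PySem.Int.mod a b).natAbs < b.natAbs := by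
  rcases lt_or_gt_of_ne hb with h | h
  · have := PySem.Int.mod_neg_bounds a h
    omega
  · have h1 := PySem.Int.mod_nonneg a h
    have h2 := PySem.Int.mod_lt a h
    omega

-- ===== PORT A =====
-- the while loop of A's GCD helper, state (a, b, r); a is dead (only b, r drive the loop)
def solutionWhile (a b r : Int) : Int :=
  if _h : r ≠ 0 then solutionWhile b r (PySem.Int.mod b r) else b
termination_by r.natAbs
decreasing_by exact pvModNatAbsLt b r _h

def solutionGCD (m n : Int) : Int :=
  let r := PySem.Int.mod m n
  if r ≠ 0 then solutionWhile m n r else n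

def solution (m : Int) (n : Int) : List Int :=
  let (m, n) := if n > m then (n, m) else (m, n)
  let gcd := solutionGCD m n
  [gcd, gcd * (PySem.Int.floordiv m gcd) * (PySem.Int.floordiv n gcd)]

-- ===== PORT B =====
-- recursive Euclid: remainder first, base case r = 0, else recurse on (b, r)
def solutionAltGCD (a b : Int) : Int :=
  let r := PySem.Int.mod a b
  if _h : r = 0 then b else solutionAltGCD b r
termination_by b.natAbs + (if b = 0 then a.natAbs + 1 else 0)
decreasing_by
  by_cases hb : b = 0
  · subst hb
    have ha : PySem.Int.mod a 0 = a := by simp [PySem.Int.mod]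
    have h1 : a ≠ 0 := by rw [← ha]; exact _h
    simp [ha, h1]
  · have h1 : PySem.Int.mod a b ≠ 0 := _h
    have h := pvModNatAbsLt a b hb
    simp only [if_neg hb, if_neg h1]
    omega

def solution_alt (m : Int) (n : Int) : List Int :=
  let (m, n) := if n > m then (n, m) else (m, n)
  let gcd := solutionAltGCD m n
  [gcd, gcd * (PySem.Int.floordiv m gcd) * (PySem.Int.floordiv n gcd)]

-- ===== PRECONDITION & SPEC =====
-- Pre_ excludes exactly the inputs where min(m, n) = 0:
-- there A's (and B's) first 'm % n' raises ZeroDivisionError.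
def Pre_solution (m : Int) (n : Int) : Prop := min m n ≠ 0
instance (m : Int) (n : Int) : Decidable (Pre_solution m n) := by unfold Pre_solution; infer_instance
def pvWitness_solution : Int × Int := (12, 18)

def Spec_solution (m : Int) (n : Int) (out : List Int) : Prop := out = solution_alt m n
instance (m : Int) (n : Int) (out : List Int) : Decidable (Spec_solution m n out) := by unfold Spec_solution; infer_instance

-- ===== CLAIM (what is proved, stated in full; the proofs are below) =====
def Claim_equal_solution : Prop := ∀ (m : Int) (n : Int), Dom_solution m n → Pre_solution m n → Spec_solution m n (solution m n)

-- ===== LEMMAS AND PROOFS =====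

theorem altGCD_eq_while (a b : Int) :
    solutionAltGCD a b =
      if PySem.Int.mod a b ≠ 0 then solutionWhile a b (PySem.Int.mod a b) else b := by
  rw [solutionAltGCD]
  by_cases hr : PySem.Int.mod a b = 0
  · simp [hr]
  · rw [dif_neg hr, if_pos hr, altGCD_eq_while b (PySem.Int.mod a b)]
    conv_rhs => rw [solutionWhile, dif_pos hr]
    by_cases h2 : PySem.Int.mod b (PySem.Int.mod a b) = 0
    · rw [if_neg (by simpa using h2), solutionWhile, dif_neg (by simpa using h2)]
    · rw [if_pos h2]
termination_by b.natAbs + (if b = 0 then a.natAbs + 1 else 0)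
decreasing_by
  by_cases hb : b = 0
  · subst hb
    have ha : PySem.Int.mod a 0 = a := by simp [PySem.Int.mod]
    have h1 : a ≠ 0 := by rw [← ha]; exact hr
    simp [ha, h1]
  · have h1 : PySem.Int.mod a b ≠ 0 := hr
    have h := pvModNatAbsLt a b hb
    simp only [if_neg hb, if_neg h1]
    omega

theorem gcd_eq (m n : Int) : solutionGCD m n = solutionAltGCD m n := by
  rw [solutionGCD, altGCD_eq_while]

-- ===== VERDICT (by name: the statement is the Claim_ definition above) =====
theorem solution_spec : Claim_equal_solution := by
  intro m n _ _
  unfold Spec_solution solution solution_alt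
  simp only [gcd_eq]
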